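-- pv_equiv track=rewrite | github.com/NadiaCorrea/RecuperacionPython | ejerciciosRecuperacion/Ejer15NumCaracteres.py | contarCaracteres2
-- ===== SOURCE A (Python) =====
-- def contarCaracteres2(cadena, caracter):
--     result = -1
--     primer = -1
--     ultimo = -1
--
--     for i in range(0, len(cadena)):
--         if cadena[i] == caracter:
--             if primer == -1:
--                 primer = i
--             ultimo = i
--
--     if primer != ultimo:
--         result = ultimo - primer
--     else:
--         result = -1
--
--     return result
-- ===== SOURCE B (Python) =====
-- def contarCaracteres2(cadena, caracter):
--     primer = -1
--     for i in range(len(cadena)):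
--         if cadena[i] == caracter:
--             primer = i
--             break
--     ultimo = -1
--     for i in range(len(cadena) - 1, -1, -1):
--         if cadena[i] == caracter:
--             ultimo = i
--             break
--     if primer != ultimo:
--         return ultimo - primer
--     return -1
-- ===== Notes on version B (the rewrite author's own statement) =====
-- stated objective: alternative
-- what changed: Replaces A's single accumulating loop carrying (primer, ultimo) state across the whole string by two independent early-exit scans: a forward scan that breaks at the first occurrence and a backward scan that breaks at the last occurrence.
import Mathlib
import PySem

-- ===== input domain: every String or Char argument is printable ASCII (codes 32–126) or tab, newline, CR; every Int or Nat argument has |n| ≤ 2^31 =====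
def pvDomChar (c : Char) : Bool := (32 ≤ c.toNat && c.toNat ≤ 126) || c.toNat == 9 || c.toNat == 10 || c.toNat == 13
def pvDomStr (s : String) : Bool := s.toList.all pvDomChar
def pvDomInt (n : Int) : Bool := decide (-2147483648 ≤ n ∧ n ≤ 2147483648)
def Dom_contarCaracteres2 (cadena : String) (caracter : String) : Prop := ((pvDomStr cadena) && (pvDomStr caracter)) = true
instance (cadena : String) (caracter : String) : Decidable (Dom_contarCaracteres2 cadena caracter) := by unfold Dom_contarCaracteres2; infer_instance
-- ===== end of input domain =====

-- B replaces A's single accumulating loop over (primer, ultimo) by two independent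
-- early-exit scans (forward for the first match, backward for the last); same values everywhere.

-- ===== PORT A =====
-- Loop body of A: Python's `cadena[i] == caracter` compares the 1-char string cadena[i]
-- with caracter; modelled exactly on code-point lists: [c] = caracter.toList.
def pvStepA (cadena : String) (caracter : String) (pu : Int × Int) (i : Int) : Int × Int :=
  if (PySem.Str.pyGet? cadena i).map (fun c => [c]) = some caracter.toList then
    ((if pu.1 = -1 then i else pu.1), i)
  else pu

def contarCaracteres2 (cadena : String) (caracter : String) : Int :=
  let st := (PySem.List.pyRange 0 (PySem.Str.len cadena) 1).foldl (pvStepA cadena caracter) (-1, -1)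
  if st.1 ≠ st.2 then st.2 - st.1 else -1

-- ===== PORT B =====
-- forward loop with `break`: first index i (counting up from the start value) with cadena[i] == caracter, else -1
def pvFirstScan (t : List Char) : List Char → Int → Int
  | [], _ => -1
  | c :: cs, i => if [c] = t then i else pvFirstScan t cs (i + 1)

-- backward loop `for i in range(len-1, -1, -1)` with `break`, rendered as a scan of the
-- reversed character list with a decreasing index: first match from the end, else -1
def pvLastScan (t : List Char) : List Char → Int → Int
  | [], _ => -1
  | c :: cs, i => if [c] = t then i else pvLastScan t cs (i - 1)

def contarCaracteres2_alt (cadena : String) (caracter : String) : Int :=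
  let cs := cadena.toList
  let t := caracter.toList
  let primer := pvFirstScan t cs 0
  let ultimo := pvLastScan t cs.reverse ((cs.length : Int) - 1)
  if primer ≠ ultimo then ultimo - primer else -1

-- ===== PRECONDITION & SPEC =====
def Spec_contarCaracteres2 (cadena : String) (caracter : String) (out : Int) : Prop := out = contarCaracteres2_alt cadena caracter
instance (cadena : String) (caracter : String) (out : Int) : Decidable (Spec_contarCaracteres2 cadena caracter out) := by unfold Spec_contarCaracteres2; infer_instance

-- ===== CLAIM (what is proved, stated in full; the proofs are below) =====
def Claim_equal_contarCaracteres2 : Prop := ∀ (cadena : String) (caracter : String), Dom_contarCaracteres2 cadena caracter → Spec_contarCaracteres2 cadena caracter (contarCaracteres2 cadena caracter)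

-- ===== LEMMAS AND PROOFS =====

-- Proof-side reference recursion: A's loop as structural recursion on the suffix of characters.
def pvAB (t : List Char) : List Char → Int → Int × Int → Int × Int
  | [], _, pu => pu
  | c :: cs, s, pu =>
      pvAB t cs (s + 1) (if [c] = t then ((if pu.1 = -1 then s else pu.1), s) else pu)

theorem pvAB_append (t xs ys : List Char) (s : Int) (pu : Int × Int) :
    pvAB t (xs ++ ys) s pu = pvAB t ys (s + xs.length) (pvAB t xs s pu) := by
  induction xs generalizing s pu with
  | nil => simp [pvAB]
  | cons c cs ih =>
      simp only [List.cons_append, pvAB, ih, List.length_cons]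
      congr 1
      push_cast
      ring

theorem pvFoldA (cadena caracter : String) :
    ∀ (cs pre : List Char), cadena.toList = pre ++ cs → ∀ (pu : Int × Int),
      (PySem.List.pyRange (pre.length : Int) ((pre.length : Int) + (cs.length : Int)) 1).foldl
          (pvStepA cadena caracter) pu
        = pvAB caracter.toList cs (pre.length : Int) pu := by
  intro cs
  induction cs with
  | nil =>
      intro pre _ pu
      rw [PySem.List.pyRange_one_eq_nil (by simp)]
      simp [pvAB]
  | cons c cs ih =>
      intro pre h pu
      rw [PySem.List.pyRange_one_cons (by push_cast [List.length_cons]; omega)]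
      simp only [List.foldl_cons]
      have hget : cadena.toList[pre.length]? = some c := by
        simp [h]
      have hstep : pvStepA cadena caracter pu (pre.length : Int)
          = (if [c] = caracter.toList then ((if pu.1 = -1 then (pre.length : Int) else pu.1), (pre.length : Int)) else pu) := by
        simp [pvStepA, hget]
      rw [hstep]
      have hb : (pre.length : Int) + ((c :: cs).length : Int) = (pre.length : Int) + 1 + (cs.length : Int) := by
        push_cast [List.length_cons]; ring
      rw [hb]
      have h' : cadena.toList = (pre ++ [c]) ++ cs := by simp [h]
      have hstart := ih (pre ++ [c]) h'
        (if [c] = caracter.toList then ((if pu.1 = -1 then (pre.length : Int) else pu.1), (pre.length : Int)) else pu)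
      have hlen : ((pre ++ [c]).length : Int) = (pre.length : Int) + 1 := by simp
      rw [hlen] at hstart
      rw [hstart]
      simp [pvAB]

theorem pvAB_fst (t : List Char) :
    ∀ (cs : List Char) (s : Int), 0 ≤ s → ∀ (pu : Int × Int),
      (pvAB t cs s pu).1 = if pu.1 = -1 then pvFirstScan t cs s else pu.1 := by
  intro cs
  induction cs with
  | nil => intro s _ pu; simp [pvAB, pvFirstScan]
  | cons c cs ih =>
      intro s hs pu
      by_cases hm : [c] = t
      · simp only [pvAB, hm, pvFirstScan]
        rw [ih (s + 1) (by omega)]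
        by_cases hp : pu.1 = -1
        · simp [hp]; omega
        · simp [hp]
      · simp only [pvAB, hm, pvFirstScan]
        exact ih (s + 1) (by omega) pu

theorem pvAB_snd (t : List Char) (s : Int) (hs : 0 ≤ s) :
    ∀ (cs : List Char) (pu : Int × Int),
      (pvAB t cs s pu).2 =
        if pvLastScan t cs.reverse (s + (cs.length : Int) - 1) = -1 then pu.2
        else pvLastScan t cs.reverse (s + (cs.length : Int) - 1) := by
  intro cs
  induction cs using List.reverseRecOn with
  | nil => intro pu; simp [pvAB, pvLastScan]
  | append_singleton xs c ih =>
      intro pu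
      rw [pvAB_append]
      have hrev : (xs ++ [c]).reverse = c :: xs.reverse := by simp
      have hlen : s + ((xs ++ [c]).length : Int) - 1 = s + (xs.length : Int) := by
        simp only [List.length_append, List.length_cons, List.length_nil]; push_cast; ring
      rw [hrev, hlen]
      by_cases hm : [c] = t
      · simp only [pvAB, hm, pvLastScan]
        have : s + (xs.length : Int) ≠ -1 := by omega
        simp [this]
      · simp only [pvAB, hm, pvLastScan]
        have := ih pu
        simpa [hm] using this

-- ===== VERDICT (by name: the statement is the Claim_ definition above) =====
theorem contarCaracteres2_spec : Claim_equal_contarCaracteres2 := by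
  intro cadena caracter _
  unfold Spec_contarCaracteres2 contarCaracteres2 contarCaracteres2_alt
  have h0 : (PySem.List.pyRange 0 (PySem.Str.len cadena) 1).foldl (pvStepA cadena caracter) (-1, -1)
      = pvAB caracter.toList cadena.toList 0 (-1, -1) := by
    have := pvFoldA cadena caracter cadena.toList [] (by simp) (-1, -1)
    simpa [PySem.Str.len_eq] using this
  simp only [h0]
  have h1 : (pvAB caracter.toList cadena.toList 0 (-1, -1)).1
      = pvFirstScan caracter.toList cadena.toList 0 := by
    rw [pvAB_fst caracter.toList cadena.toList 0 le_rfl]; simp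
  have h2 : (pvAB caracter.toList cadena.toList 0 (-1, -1)).2
      = pvLastScan caracter.toList cadena.toList.reverse ((cadena.toList.length : Int) - 1) := by
    rw [pvAB_snd caracter.toList 0 le_rfl cadena.toList]
    split <;> simp_all
  simp only [h1, h2]
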